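-- pv_equiv track=rewrite | github.com/Frank-Hack/python-security-tools | intel/cve_lookup.py | _pick_description
-- ===== SOURCE A (Python) =====
-- from typing import Any, Dict, List, Optional, Tuple
--
-- def _pick_description(descriptions: List[Dict[str, Any]], lang_preference: str) -> str:
--     if not descriptions:
--         return "No disponible"
--     # Try preferred language
--     for d in descriptions:
--         if d.get("lang") == lang_preference and d.get("value"):
--             return d["value"].strip()
--     # Fallback to English
--     for d in descriptions:
--         if d.get("lang") == "en" and d.get("value"):
--             return d["value"].strip()
--     # Any
--     for d in descriptions:
--         if d.get("value"):
--             return d["value"].strip()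
--     return "No disponible"
-- ===== SOURCE B (Python) =====
-- def _pick_description(descriptions, lang_preference):
--     first_en = None
--     first_any = None
--     for d in descriptions:
--         v = d.get("value")
--         if not v:
--             continue
--         if d.get("lang") == lang_preference:
--             return v.strip()
--         if first_en is None and d.get("lang") == "en":
--             first_en = v
--         if first_any is None:
--             first_any = v
--     if first_en is not None:
--         return first_en.strip()
--     if first_any is not None:
--         return first_any.strip()
--     return "No disponible"
-- ===== Notes on version B (the rewrite author's own statement) =====
-- stated objective: alternative
-- what changed: Replaces A's three sequential scans (preferred lang, then 'en', then any) by one short-circuiting pass that records the first 'en' and first any candidates in two accumulators.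
import Mathlib
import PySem

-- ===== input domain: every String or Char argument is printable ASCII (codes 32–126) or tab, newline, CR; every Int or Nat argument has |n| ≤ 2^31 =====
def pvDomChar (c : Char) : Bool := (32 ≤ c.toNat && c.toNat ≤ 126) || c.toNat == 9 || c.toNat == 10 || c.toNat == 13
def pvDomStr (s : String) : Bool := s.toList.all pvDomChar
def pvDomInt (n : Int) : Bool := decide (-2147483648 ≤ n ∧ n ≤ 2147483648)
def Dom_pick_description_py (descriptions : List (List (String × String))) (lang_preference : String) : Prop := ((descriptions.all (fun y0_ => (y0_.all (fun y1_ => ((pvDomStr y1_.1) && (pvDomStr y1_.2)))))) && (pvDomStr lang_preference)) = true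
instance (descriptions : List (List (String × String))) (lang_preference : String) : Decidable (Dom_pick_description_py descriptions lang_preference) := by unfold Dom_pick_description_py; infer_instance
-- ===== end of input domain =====

-- B replaces A's three sequential scans by one short-circuiting pass that records the
-- first 'en' / first any candidates in two accumulators (objective: alternative single-pass decomposition).

-- ===== PORT A =====

-- d.get(k) on the dict d (first match = the dict's value, keys are unique in Python)
def pvGetKey (d : List (String × String)) (k : String) : Option String :=
  (PySem.Dict.mk d).get? k

-- d.get("value") truthiness: some s with s nonempty, else none
def pvVal? (d : List (String × String)) : Option String :=
  match pvGetKey d "value" with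
  | some s => if s == "" then none else some s
  | none => none

-- first loop of A: first d with d.get("lang") == lang_preference and d.get("value")
def pvLoopPref (lang : String) : List (List (String × String)) → Option String
  | [] => none
  | d :: rest =>
    match (if pvGetKey d "lang" == some lang then pvVal? d else none) with
    | some s => some s
    | none => pvLoopPref lang rest

-- second loop of A: first d with d.get("lang") == "en" and d.get("value")
def pvLoopEn : List (List (String × String)) → Option String
  | [] => none
  | d :: rest =>
    match (if pvGetKey d "lang" == some "en" then pvVal? d else none) with
    | some s => some s
    | none => pvLoopEn rest

-- third loop of A: first d with d.get("value")
def pvLoopAny : List (List (String × String)) → Option String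
  | [] => none
  | d :: rest =>
    match pvVal? d with
    | some s => some s
    | none => pvLoopAny rest

def pick_description_py (descriptions : List (List (String × String))) (lang_preference : String) : String :=
  if descriptions = [] then "No disponible"
  else
    match pvLoopPref lang_preference descriptions with
    | some s => PySem.Str.strip s
    | none =>
      match pvLoopEn descriptions with
      | some s => PySem.Str.strip s
      | none =>
        match pvLoopAny descriptions with
        | some s => PySem.Str.strip s
        | none => "No disponible"

-- ===== PORT B =====

-- the returns after B's loop
def pvBFin (first_en first_any : Option String) : String :=
  match first_en with
  | some v => PySem.Str.strip v
  | none =>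
    match first_any with
    | some v => PySem.Str.strip v
    | none => "No disponible"

-- B's single pass with the two accumulators
def pvBLoop (lang : String) : List (List (String × String)) → Option String → Option String → String
  | [], first_en, first_any => pvBFin first_en first_any
  | d :: rest, first_en, first_any =>
    match pvVal? d with
    | none => pvBLoop lang rest first_en first_any
    | some v =>
      if pvGetKey d "lang" == some lang then PySem.Str.strip v
      else
        pvBLoop lang rest
          (if first_en.isNone && (pvGetKey d "lang" == some "en") then some v else first_en)
          (if first_any.isNone then some v else first_any)

def pick_description_py_alt (descriptions : List (List (String × String))) (lang_preference : String) : String :=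
  pvBLoop lang_preference descriptions none none

-- ===== PRECONDITION & SPEC =====
def Spec_pick_description_py (descriptions : List (List (String × String))) (lang_preference : String) (out : String) : Prop := out = pick_description_py_alt descriptions lang_preference
instance (descriptions : List (List (String × String))) (lang_preference : String) (out : String) : Decidable (Spec_pick_description_py descriptions lang_preference out) := by unfold Spec_pick_description_py; infer_instance

-- ===== CLAIM (what is proved, stated in full; the proofs are below) =====
def Claim_equal_pick_description_py : Prop := ∀ (descriptions : List (List (String × String))) (lang_preference : String), Dom_pick_description_py descriptions lang_preference → Spec_pick_description_py descriptions lang_preference (pick_description_py descriptions lang_preference)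

-- ===== LEMMAS AND PROOFS =====

-- if A's first loop finds a value, B returns it (stripped), whatever the accumulators hold
theorem pvBLoop_of_pref {lang : String} {ds : List (List (String × String))} {s : String}
    (h : pvLoopPref lang ds = some s) (fe fa : Option String) :
    pvBLoop lang ds fe fa = PySem.Str.strip s := by
  induction ds generalizing fe fa with
  | nil => simp [pvLoopPref] at h
  | cons d rest ih =>
    by_cases hl : pvGetKey d "lang" == some lang
    · cases hv : pvVal? d with
      | none => simp [pvLoopPref, hl, hv] at h; simp [pvBLoop, hv]; exact ih h _ _
      | some v =>
        simp [pvLoopPref, hl, hv] at h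
        simp [pvBLoop, hv, hl, h]
    · cases hv : pvVal? d with
      | none => simp [pvLoopPref, hl] at h; simp [pvBLoop, hv]; exact ih h _ _
      | some v =>
        simp [pvLoopPref, hl] at h
        simp [pvBLoop, hv, hl]
        exact ih h _ _

-- if A's first loop finds nothing, B computes the fallback chain with its accumulators
theorem pvBLoop_of_no_pref {lang : String} {ds : List (List (String × String))}
    (h : pvLoopPref lang ds = none) (fe fa : Option String) :
    pvBLoop lang ds fe fa = pvBFin (fe.or (pvLoopEn ds)) (fa.or (pvLoopAny ds)) := by
  induction ds generalizing fe fa with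
  | nil => cases fe <;> cases fa <;> simp [pvBLoop, pvLoopEn, pvLoopAny, Option.or]
  | cons d rest ih =>
    by_cases hl : pvGetKey d "lang" == some lang
    · cases hv : pvVal? d with
      | none =>
        simp [pvLoopPref, hl, hv] at h
        simp [pvBLoop, hv, pvLoopEn, pvLoopAny]
        exact ih h _ _
      | some v => simp [pvLoopPref, hl, hv] at h
    · cases hv : pvVal? d with
      | none =>
        simp [pvLoopPref, hl] at h
        simp [pvBLoop, hv, pvLoopEn, pvLoopAny]
        exact ih h _ _
      | some v =>
        simp [pvLoopPref, hl] at h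
        simp [pvBLoop, hv, hl]
        rw [ih h]
        cases fe <;> cases fa <;>
          by_cases he : pvGetKey d "lang" = some "en" <;>
          simp [pvLoopEn, pvLoopAny, hv, he, Option.or]

-- ===== VERDICT (by name: the statement is the Claim_ definition above) =====
theorem pick_description_py_spec : Claim_equal_pick_description_py := by
  intro ds lang _
  unfold Spec_pick_description_py pick_description_py pick_description_py_alt
  by_cases hnil : ds = []
  · subst hnil; simp [pvBLoop, pvBFin]
  · simp only [hnil, if_false]
    cases hp : pvLoopPref lang ds with
    | some s => rw [pvBLoop_of_pref hp]
    | none =>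
      rw [pvBLoop_of_no_pref hp]
      cases he : pvLoopEn ds <;> cases ha : pvLoopAny ds <;>
        simp [pvBFin, Option.or]
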